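-- pv_equiv track=rewrite | github.com/robambert/100detours-1 | 100detoursBack/back/apis/common/query_language.py | find_quoted_elements
-- ===== SOURCE A (Python) =====
-- class QuerySyntaxError(Exception):
--     def __init__(self, string=None, message=None):
--         self.string = string
--         self.message = message
--         super().__init__()
--
--     def __str__(self):
--         msg = "invalid syntax"
--         if hasattr(self, "string", None):
--             msg = f"{self.string}: " + msg
--         if hasattr(self, "message"):
--             msg += ": " + self.message
--         else:
--             return "An error has occured while parsing"
--
-- def find_quoted_elements(val: str):
--     """Find pairs of non escaped quotation marks"""
--     ret = list()
--     cur = 0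
--     while(True):
--         start = find_next_quote(val, cur)
--         if start == -1:
--             break
--         else:
--             end = find_next_quote(val, start + 1)
--             if end == -1:
--                 raise QuerySyntaxError(val, f"opening '\"' at index {start} never closed.")
--             ret.append((start, end))
--             cur = end + 1
--     return ret
--
-- def find_next_quote(val: str, start: int):
--     """Return the index of the next non-escaped quotation mark, or -1."""
--     cur = start
--     while(True):
--         cur = val.find('"', cur)
--         if cur > 0 and val[cur - 1] == '\\':
--             cur += 1
--             continue
--         else:
--             return cur
-- ===== SOURCE B (Python) =====
-- class QuerySyntaxError(Exception):
--     def __init__(self, string=None, message=None):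
--         self.string = string
--         self.message = message
--         super().__init__()
--
--
-- def find_quoted_elements(val: str):
--     """Find pairs of non escaped quotation marks"""
--     quotes = [i for i in range(len(val))
--               if val[i] == '"' and not (i > 0 and val[i - 1] == '\\')]
--     if len(quotes) % 2:
--         raise QuerySyntaxError(val, f"opening '\"' at index {quotes[-1]} never closed.")
--     it = iter(quotes)
--     return list(zip(it, it))
-- ===== Notes on version B (the rewrite author's own statement) =====
-- stated objective: simpler
-- what changed: Replaces A's nested while-loops that jump with str.find and re-scan after escaped quotes by a single comprehension collecting every unescaped quote index followed by pairing consecutive indices with zip; Pre_ excludes only the inputs with an odd number of unescaped quotes, on which both A and B raise QuerySyntaxError.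
import Mathlib
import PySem

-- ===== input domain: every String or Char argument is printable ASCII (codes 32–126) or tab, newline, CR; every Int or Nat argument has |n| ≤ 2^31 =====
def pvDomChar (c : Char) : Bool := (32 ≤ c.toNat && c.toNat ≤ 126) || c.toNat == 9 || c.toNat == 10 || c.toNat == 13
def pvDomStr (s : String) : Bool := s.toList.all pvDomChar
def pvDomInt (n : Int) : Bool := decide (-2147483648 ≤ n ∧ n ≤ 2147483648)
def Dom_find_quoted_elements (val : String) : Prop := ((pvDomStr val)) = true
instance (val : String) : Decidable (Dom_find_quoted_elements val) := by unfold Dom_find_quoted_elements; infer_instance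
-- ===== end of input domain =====

-- B replaces A's str.find-jumping nested while-loops by one scan that collects every
-- unescaped quote index and then pairs consecutive indices (simpler decomposition, same cost).

-- ===== PORT A =====
-- helper `find_next_quote(val, start)`: cur = val.find('"', cur); skip past escaped quotes.
-- The `while True` loop is fueled: each continue moves the search start strictly forward,
-- so fuel s.length + 1 never runs out when entered with start = 0 or a later position
-- (the fuel-0 fallback -1 is what the Python loop returns once the search start passes the end).
def pvFNQgo (s : List Char) (fuel : Nat) (start : Int) : Int :=
  match fuel with
  | 0 => -1
  | fuel + 1 =>
    let cur := PySem.Chars.findFrom s ['"'] start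
    if 0 < cur ∧ PySem.List.pyGet? s (cur - 1) = some '\\' then
      pvFNQgo s fuel (cur + 1)
    else
      cur

def pvFindNextQuote (s : List Char) (start : Int) : Int :=
  pvFNQgo s (s.length + 1) start

-- the main `while True` loop of A: find an opening quote, then its closing quote, append the
-- pair.  Fueled likewise: cur advances past each found pair, so fuel s.length + 1 suffices
-- (the fuel-0 fallback ret is what the Python loop returns once cur passes the end).
def pvFqeGo (s : List Char) (fuel : Nat) (ret : List (Int × Int)) (cur : Int) : List (Int × Int) :=
  match fuel with
  | 0 => ret
  | fuel + 1 =>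
    let start := pvFindNextQuote s cur
    if start = -1 then ret
    else
      let e := pvFindNextQuote s (start + 1)
      if e = -1 then ret  -- Python raises QuerySyntaxError here; such inputs are excluded by Pre_
      else pvFqeGo s fuel (ret ++ [(start, e)]) (e + 1)

def find_quoted_elements (val : String) : List (Int × Int) :=
  pvFqeGo val.toList (val.toList.length + 1) [] 0

-- ===== PORT B =====
-- B's comprehension: every index i with val[i] == '"' not preceded by a backslash.
def pvQuotes (cs : List Char) : List Int :=
  (PySem.List.pyRange 0 (cs.length : Int)).filter
    (fun i => PySem.List.pyGet? cs i == some '"' &&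
      !(decide (0 < i) && (PySem.List.pyGet? cs (i - 1) == some '\\')))

-- B's `list(zip(it, it))` over one iterator: consecutive pairing.
def pvPairUp : List Int → List (Int × Int)
  | a :: b :: rest => (a, b) :: pvPairUp rest
  | _ => []

def find_quoted_elements_alt (val : String) : List (Int × Int) :=
  -- on an odd number of collected indices B raises QuerySyntaxError (excluded by Pre_);
  -- there zip(it, it) drops the unpaired index, which is exactly what pvPairUp computes.
  pvPairUp (pvQuotes val.toList)

-- ===== PRECONDITION & SPEC =====
def pvUnesc (cs : List Char) (i : Nat) : Bool :=
  cs[i]? == some '"' && !(decide (0 < i) && (cs[i - 1]? == some '\\'))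

def pvQN (cs : List Char) : List Nat :=
  (List.range cs.length).filter (pvUnesc cs)

-- Pre_ excludes exactly the inputs with an odd number of unescaped quotes,
-- on which A (and B) raise QuerySyntaxError.
def Pre_find_quoted_elements (val : String) : Prop :=
  (pvQN val.toList).length % 2 = 0
instance (val : String) : Decidable (Pre_find_quoted_elements val) := by
  unfold Pre_find_quoted_elements; infer_instance

def pvWitness_find_quoted_elements : String := "\"ab\" x \\\" \"c\""

def Spec_find_quoted_elements (val : String) (out : List (Int × Int)) : Prop :=
  out = find_quoted_elements_alt val
instance (val : String) (out : List (Int × Int)) : Decidable (Spec_find_quoted_elements val out) := by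
  unfold Spec_find_quoted_elements; infer_instance

-- ===== CLAIM (what is proved, stated in full; the proofs are below) =====
def Claim_equal_find_quoted_elements : Prop :=
  ∀ (val : String), Dom_find_quoted_elements val → Pre_find_quoted_elements val →
    Spec_find_quoted_elements val (find_quoted_elements val)

-- ===== LEMMAS AND PROOFS =====

theorem pvQuotes_eq (cs : List Char) :
    pvQuotes cs = List.map Int.ofNat (pvQN cs) := by
  unfold pvQuotes pvQN
  rw [PySem.List.pyRange_zero_natCast]
  show List.filter _ (List.map Int.ofNat (List.range cs.length)) = _
  rw [List.filter_map]
  refine congrArg (List.map Int.ofNat) (List.filter_congr ?_)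
  intro i _
  simp only [Function.comp]
  cases i with
  | zero =>
    have e1 : (Int.ofNat 0) = ((0 : Nat) : Int) := rfl
    rw [e1, PySem.List.pyGet?_natCast]
    simp [pvUnesc]
  | succ j =>
    have e1 : (Int.ofNat (j + 1)) = ((j + 1 : Nat) : Int) := rfl
    have e2 : ((j + 1 : Nat) : Int) - 1 = ((j : Nat) : Int) := by omega
    rw [e1, e2, PySem.List.pyGet?_natCast, PySem.List.pyGet?_natCast]
    simp [pvUnesc]

theorem mem_pvQN (cs : List Char) (q : Nat) :
    q ∈ pvQN cs ↔ q < cs.length ∧ pvUnesc cs q = true := by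
  simp [pvQN, List.mem_filter]

theorem pvQN_pairwise (cs : List Char) : (pvQN cs).Pairwise (· < ·) :=
  List.Pairwise.filter _ List.pairwise_lt_range

theorem pvQuotes_pairwise (cs : List Char) : (pvQuotes cs).Pairwise (· < ·) := by
  rw [pvQuotes_eq, List.pairwise_map]
  exact (pvQN_pairwise cs).imp (fun h => Int.ofNat_lt.mpr h)

theorem mem_pvQuotes (cs : List Char) (q : Int) :
    q ∈ pvQuotes cs ↔ 0 ≤ q ∧ q.toNat < cs.length ∧ pvUnesc cs q.toNat = true := by
  rw [pvQuotes_eq]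
  simp only [List.mem_map]
  constructor
  · rintro ⟨i, hi, rfl⟩
    have := (mem_pvQN cs i).mp hi
    simpa using this
  · rintro ⟨h0, h1, h2⟩
    refine ⟨q.toNat, (mem_pvQN cs q.toNat).mpr ⟨h1, h2⟩, ?_⟩
    exact Int.toNat_of_nonneg h0

theorem pvQuoteAt (cs : List Char) (i : Nat) :
    ['"'] <+: cs.drop i ↔ cs[i]? = some '"' := by
  rw [← List.head?_drop]
  cases h : cs.drop i with
  | nil => simp
  | cons a t =>
    constructor
    · rintro ⟨u, hu⟩
      simp at hu
      simp [hu.1.symm]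
    · intro hh
      simp at hh
      exact ⟨t, by simp [hh]⟩

theorem pvFindFrom_neg_one_le (s : List Char) (start : Int) :
    -1 ≤ PySem.Chars.findFrom s ['"'] start none := by
  simp only [PySem.Chars.findFrom]
  have hf := PySem.Chars.neg_one_le_find ((List.take (s.length : Int).toNat s).drop (if start < 0 then if start + s.length < 0 then 0 else start + s.length else start).toNat) ['"']
  split_ifs with h1 h2 h3 h4 <;> simp_all <;> omega

theorem pvFindFrom_ge_start (s : List Char) (start : Int) (h0 : 0 ≤ start)
    (h : PySem.Chars.findFrom s ['"'] start none ≠ -1) :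
    start ≤ PySem.Chars.findFrom s ['"'] start none := by
  simp only [PySem.Chars.findFrom] at h ⊢
  have hf := PySem.Chars.neg_one_le_find ((List.take (s.length : Int).toNat s).drop (if start < 0 then if start + s.length < 0 then 0 else start + s.length else start).toNat) ['"']
  split_ifs at h ⊢ with h1 h2 <;> simp_all <;> omega

theorem pvFF_eq_neg_one_iff (cs : List Char) (k : Nat) (hk : k ≤ cs.length) :
    PySem.Chars.findFrom cs ['"'] (k : Int) none = -1 ↔
      ∀ i, k ≤ i → cs[i]? ≠ some '"' := by
  rw [PySem.Chars.findFrom_natCast_eq_neg_one_iff cs ['"'] k hk]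
  rw [← PySem.Chars.isIn_iff_infix, ← PySem.Chars.exists_prefix_drop_iff_isIn]
  constructor
  · intro h i hi hq
    exact h ⟨i - k, by rw [List.drop_drop, show k + (i - k) = i by omega, pvQuoteAt]; exact hq⟩
  · rintro h ⟨j, hj⟩
    rw [List.drop_drop, pvQuoteAt] at hj
    exact h (k + j) (by omega) hj

theorem pvFF_gt (cs : List Char) (start : Int) (h : (cs.length : Int) < start) :
    PySem.Chars.findFrom cs ['"'] start none = -1 := by
  simp only [PySem.Chars.findFrom]
  split_ifs with h1 h2 <;> simp_all <;> omega

theorem pvHeadD_eq_of_min {l : List Int} (d x : Int) (hp : l.Pairwise (· < ·))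
    (hx : x ∈ l) (hmin : ∀ y ∈ l, x ≤ y) : l.headD d = x := by
  cases l with
  | nil => simp at hx
  | cons a t =>
    simp only [List.headD_cons]
    rcases List.mem_cons.mp hx with h | h
    · omega
    · have h1 := (List.pairwise_cons.mp hp).1 x h
      have h2 := hmin a (List.mem_cons_self ..)
      omega

theorem pvFilter_tail_eq {Q : List Int} (hp : Q.Pairwise (· < ·)) (c x : Int) {t : List Int}
    (hF : Q.filter (fun q => decide (c ≤ q)) = x :: t) :
    Q.filter (fun q => decide (x + 1 ≤ q)) = t := by
  have hcx : c ≤ x := by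
    have : x ∈ Q.filter (fun q => decide (c ≤ q)) := hF ▸ List.mem_cons_self ..
    simpa using (List.mem_filter.mp this).2
  have h1 : Q.filter (fun q => decide (x + 1 ≤ q)) =
      (Q.filter (fun q => decide (c ≤ q))).filter (fun q => decide (x + 1 ≤ q)) := by
    rw [List.filter_filter]
    apply List.filter_congr
    intro q _
    by_cases h : x + 1 ≤ q
    · have hx : c ≤ q := by omega
      simp [h, hx]
    · simp [h]
  have hpf : (Q.filter (fun q => decide (c ≤ q))).Pairwise (· < ·) := hp.filter _
  rw [hF] at hpf
  rw [h1, hF, List.filter_cons]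
  simp only [show decide (x + 1 ≤ x) = false by simp]
  apply List.filter_eq_self.mpr
  intro y hy
  have := (List.pairwise_cons.mp hpf).1 y hy
  simpa using by omega

theorem pvUnesc_iff (cs : List Char) (i : Nat) :
    pvUnesc cs i = true ↔ cs[i]? = some '"' ∧ ¬(0 < i ∧ cs[i - 1]? = some '\\') := by
  simp only [pvUnesc, Bool.and_eq_true, beq_iff_eq, Bool.not_eq_true', Bool.and_eq_false_iff,
    decide_eq_false_iff_not]
  constructor
  · rintro ⟨hq, hrest⟩
    refine ⟨hq, ?_⟩
    rintro ⟨hpos, hb⟩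
    rcases hrest with h0 | hnb
    · omega
    · rw [beq_eq_false_iff_ne] at hnb; exact hnb hb
  · rintro ⟨hq, hr⟩
    refine ⟨hq, ?_⟩
    by_cases hi : 0 < i
    · right; rw [beq_eq_false_iff_ne]; exact fun hb => hr ⟨hi, hb⟩
    · left; omega

theorem pvFNQgo_eq (cs : List Char) : ∀ (fuel : Nat) (start : Int), 0 ≤ start →
    cs.length + 1 - start.toNat ≤ fuel →
    pvFNQgo cs fuel start =
      ((pvQuotes cs).filter (fun q => decide (start ≤ q))).headD (-1) := by
  intro fuel
  induction fuel with
  | zero =>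
    intro start h0 hf
    have hfil : (pvQuotes cs).filter (fun q => decide (start ≤ q)) = [] := by
      apply List.filter_eq_nil_iff.mpr
      intro q hq
      rcases (mem_pvQuotes cs q).mp hq with ⟨hq0, hqlen, -⟩
      simp only [decide_eq_true_eq]
      omega
    rw [hfil]
    simp [pvFNQgo]
  | succ fuel ih =>
    intro start h0 hf
    simp only [pvFNQgo]
    by_cases h : 0 < PySem.Chars.findFrom cs ['"'] start ∧
        PySem.List.pyGet? cs (PySem.Chars.findFrom cs ['"'] start - 1) = some '\\'
    · rw [if_pos h]
      set cur := PySem.Chars.findFrom cs ['"'] start with hcurdef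
      have hne : PySem.Chars.findFrom cs ['"'] start none ≠ -1 := by
        have := h.1; omega
      have hsle : start ≤ cur := pvFindFrom_ge_start cs start h0 hne
      have hsn : ¬ ((cs.length : Int) < start) := fun hlt => by
        have := pvFF_gt cs start hlt; have := h.1; omega
      have hk : ((start.toNat : Nat) : Int) = start := Int.toNat_of_nonneg h0
      have spec := PySem.Chars.findFrom_natCast_spec cs ['"'] start.toNat (by omega)
        (by rw [hk]; exact hne)
      rw [hk] at spec
      have hmin : ∀ i, start.toNat ≤ i → i < cur.toNat → cs[i]? ≠ some '"' := by
        intro i hi1 hi2 hqi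
        exact spec.2.2 i hi1 hi2 ((pvQuoteAt cs i).mpr hqi)
      have hesc : cs[cur.toNat - 1]? = some '\\' := by
        have h2 := h.2
        have e : cur - 1 = ((cur.toNat - 1 : Nat) : Int) := by have := h.1; omega
        rw [e, PySem.List.pyGet?_natCast] at h2
        exact h2
      rw [ih (cur + 1) (by have := h.1; omega) (by have := h.1; omega)]
      congr 1
      apply List.filter_congr
      intro q hq
      rcases (mem_pvQuotes cs q).mp hq with ⟨hq0, hqlen, hqu⟩
      rcases (pvUnesc_iff cs q.toNat).mp hqu with ⟨hqq, hqne⟩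
      rw [decide_eq_decide]
      constructor
      · intro hcq; omega
      · intro hsq
        by_contra hcq
        have hqc : q ≤ cur := by omega
        have hc1 := h.1
        rcases lt_or_eq_of_le hqc with hlt | heq
        · exact hmin q.toNat (by omega) (by omega) hqq
        · have hqt : q.toNat = cur.toNat := by omega
          exact hqne ⟨by omega, by rw [hqt]; exact hesc⟩
    · rw [if_neg h]
      set cur := PySem.Chars.findFrom cs ['"'] start with hcurdef
      by_cases hne : cur = -1
      · have hfil : (pvQuotes cs).filter (fun q => decide (start ≤ q)) = [] := by
          apply List.filter_eq_nil_iff.mpr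
          intro q hq
          rcases (mem_pvQuotes cs q).mp hq with ⟨hq0, hqlen, hqu⟩
          rcases (pvUnesc_iff cs q.toNat).mp hqu with ⟨hqq, -⟩
          simp only [decide_eq_true_eq]
          intro hsq
          by_cases hsn : (cs.length : Int) < start
          · omega
          · have hiff := (pvFF_eq_neg_one_iff cs start.toNat (by omega)).mp
              (by rw [Int.toNat_of_nonneg h0]; exact hne)
            exact hiff q.toNat (by omega) hqq
        rw [hfil]
        simpa using hne
      · have hge : 0 ≤ cur := by
          have := pvFindFrom_neg_one_le cs start; omega
        have hsn : ¬ ((cs.length : Int) < start) := fun hlt => by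
          have := pvFF_gt cs start hlt; omega
        have hk : ((start.toNat : Nat) : Int) = start := Int.toNat_of_nonneg h0
        have spec := PySem.Chars.findFrom_natCast_spec cs ['"'] start.toNat (by omega)
          (by rw [hk]; exact hne)
        rw [hk] at spec
        have hq : cs[cur.toNat]? = some '"' := (pvQuoteAt cs cur.toNat).mp spec.2.1
        have hcur_mem : cur ∈ pvQuotes cs := by
          apply (mem_pvQuotes cs cur).mpr
          refine ⟨hge, ?_, ?_⟩
          · have := List.getElem?_eq_some_iff.mp hq
            exact this.1
          · apply (pvUnesc_iff cs cur.toNat).mpr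
            refine ⟨hq, ?_⟩
            rintro ⟨hpos, hbs⟩
            apply h
            refine ⟨by omega, ?_⟩
            have e : cur - 1 = ((cur.toNat - 1 : Nat) : Int) := by omega
            rw [e, PySem.List.pyGet?_natCast]
            exact hbs
        symm
        apply pvHeadD_eq_of_min
        · exact (pvQuotes_pairwise cs).filter _
        · exact List.mem_filter.mpr ⟨hcur_mem, by simpa using spec.1⟩
        · intro y hy
          rcases List.mem_filter.mp hy with ⟨hym, hys⟩
          rcases (mem_pvQuotes cs y).mp hym with ⟨hy0, hylen, hyu⟩
          rcases (pvUnesc_iff cs y.toNat).mp hyu with ⟨hyq, -⟩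
          by_contra hlt
          have := spec.2.2 y.toNat (by simp at hys; omega) (by omega)
            ((pvQuoteAt cs y.toNat).mpr hyq)
          exact this

theorem pvFNQ_eq (cs : List Char) (start : Int) (h0 : 0 ≤ start) :
    pvFindNextQuote cs start =
      ((pvQuotes cs).filter (fun q => decide (start ≤ q))).headD (-1) :=
  pvFNQgo_eq cs (cs.length + 1) start h0 (by omega)

theorem pvFqeGo_eq (cs : List Char) : ∀ (fuel : Nat) (ret : List (Int × Int)) (cur : Int),
    0 ≤ cur → cs.length + 1 - cur.toNat ≤ fuel →
    ((pvQuotes cs).filter (fun q => decide (cur ≤ q))).length % 2 = 0 →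
    pvFqeGo cs fuel ret cur =
      ret ++ pvPairUp ((pvQuotes cs).filter (fun q => decide (cur ≤ q))) := by
  intro fuel
  induction fuel with
  | zero =>
    intro ret cur h0 hf he
    have hfil : (pvQuotes cs).filter (fun q => decide (cur ≤ q)) = [] := by
      apply List.filter_eq_nil_iff.mpr
      intro q hq
      rcases (mem_pvQuotes cs q).mp hq with ⟨hq0, hqlen, -⟩
      simp only [decide_eq_true_eq]
      omega
    rw [hfil]
    simp [pvFqeGo, pvPairUp]
  | succ fuel ih =>
    intro ret cur h0 hf he
    simp only [pvFqeGo]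
    set start := pvFindNextQuote cs cur with hstartdef
    have hfnq := pvFNQ_eq cs cur h0
    set F := (pvQuotes cs).filter (fun q => decide (cur ≤ q)) with hFdef
    by_cases hstart : start = -1
    · rw [if_pos hstart]
      have hF : F = [] := by
        cases hc : F with
        | nil => rfl
        | cons a t =>
          exfalso
          have ha : a ∈ pvQuotes cs :=
            (List.mem_filter.mp (by rw [hFdef] at hc; exact hc ▸ List.mem_cons_self ..)).1
          have ha0 : 0 ≤ a := ((mem_pvQuotes cs a).mp ha).1
          rw [hc] at hfnq
          simp only [List.headD_cons] at hfnq
          omega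
      rw [hF]
      simp [pvPairUp]
    · rw [if_neg hstart]
      have hFne : F ≠ [] := by
        intro hnil
        rw [hnil] at hfnq
        simp at hfnq
        omega
      obtain ⟨a, t, hc⟩ := List.exists_cons_of_ne_nil hFne
      have hstart_a : start = a := by rw [hc] at hfnq; simpa using hfnq
      have ha : a ∈ pvQuotes cs :=
        (List.mem_filter.mp (by rw [hFdef] at hc; exact hc ▸ List.mem_cons_self ..)).1
      have ha0 : 0 ≤ a := ((mem_pvQuotes cs a).mp ha).1
      have hca : cur ≤ a := by
        have : a ∈ F := hc ▸ List.mem_cons_self ..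
        rw [hFdef] at this
        simpa using (List.mem_filter.mp this).2
      have hc' : (pvQuotes cs).filter (fun q => decide (cur ≤ q)) = start :: t := by
        rw [← hFdef, hc, hstart_a]
      have ht : (pvQuotes cs).filter (fun q => decide (start + 1 ≤ q)) = t :=
        pvFilter_tail_eq (pvQuotes_pairwise cs) cur start hc'
      have hfnq2 := pvFNQ_eq cs (start + 1) (by omega)
      rw [ht] at hfnq2
      set e := pvFindNextQuote cs (start + 1) with hedef
      by_cases hend : e = -1
      · rw [if_pos hend]
        exfalso
        have ht_nil : t = [] := by
          cases hct : t with
          | nil => rfl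
          | cons b u =>
            exfalso
            have hb : b ∈ t := hct ▸ List.mem_cons_self ..
            have hbm : b ∈ pvQuotes cs := by
              have := ht ▸ hb
              exact (List.mem_filter.mp this).1
            have hb0 : 0 ≤ b := ((mem_pvQuotes cs b).mp hbm).1
            rw [hct] at hfnq2
            simp only [List.headD_cons] at hfnq2
            omega
        rw [hc, ht_nil] at he
        simp at he
      · rw [if_neg hend]
        have htne : t ≠ [] := by
          intro hnil
          rw [hnil] at hfnq2
          simp at hfnq2
          omega
        obtain ⟨b, u, hct⟩ := List.exists_cons_of_ne_nil htne
        have he_b : e = b := by rw [hct] at hfnq2; simpa using hfnq2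
        have hbm : b ∈ pvQuotes cs := by
          have : b ∈ t := hct ▸ List.mem_cons_self ..
          exact (List.mem_filter.mp (ht ▸ this)).1
        have hb0 : 0 ≤ b := ((mem_pvQuotes cs b).mp hbm).1
        have hblen : b.toNat < cs.length := ((mem_pvQuotes cs b).mp hbm).2.1
        have hab : a < b := by
          have hpf : F.Pairwise (· < ·) := by
            rw [hFdef]; exact (pvQuotes_pairwise cs).filter _
          rw [hc] at hpf
          exact (List.pairwise_cons.mp hpf).1 b (hct ▸ List.mem_cons_self ..)
        have hct' : (pvQuotes cs).filter (fun q => decide (start + 1 ≤ q)) = e :: u := by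
          rw [ht, hct, he_b]
        have hu : (pvQuotes cs).filter (fun q => decide (e + 1 ≤ q)) = u :=
          pvFilter_tail_eq (pvQuotes_pairwise cs) (start + 1) e hct'
        rw [ih (ret ++ [(start, e)]) (e + 1) (by omega) (by omega)
          (by rw [hu]; have hee := he; rw [hc, hct] at hee; simp at hee; omega)]
        rw [hu, hc, hct, hstart_a, he_b]
        simp [pvPairUp]

-- ===== VERDICT (by name: the statement is the Claim_ definition above) =====
theorem find_quoted_elements_spec : Claim_equal_find_quoted_elements := by
  intro val _hdom hpre
  show find_quoted_elements val = find_quoted_elements_alt val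
  have hfe : (pvQuotes val.toList).filter (fun q => decide ((0:Int) ≤ q)) = pvQuotes val.toList := by
    apply List.filter_eq_self.mpr
    intro q hq
    have := (mem_pvQuotes val.toList q).mp hq
    simpa using this.1
  have hlen : (pvQuotes val.toList).length = (pvQN val.toList).length := by
    simp [pvQuotes_eq]
  unfold find_quoted_elements find_quoted_elements_alt
  rw [pvFqeGo_eq val.toList (val.toList.length + 1) [] 0 le_rfl (by omega) (by rw [hfe, hlen]; exact hpre), hfe]
  simp
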